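-- pv_equiv track=rewrite | github.com/Chazaster/CFG-Compression | huffman.py | symbolTable
-- ===== SOURCE A (Python) =====
-- def symbolTable(temp):
--     cleanedTemp = list(set(temp))
--     lower = []
--     upper = []
--     for i in cleanedTemp:
--         if i.islower():
--             lower.append(i)
--         else:
--             upper.append(i)
--     lower.sort()
--     upper.sort()
--     symbolTable = lower + upper
--     return symbolTable
-- ===== SOURCE B (Python) =====
-- def symbolTable(temp):
--     # Insertion sort by composite key (lowercase group first, then by string):
--     # each distinct element is inserted at its final position in one growing list.
--     out = []
--     for x in set(temp):
--         k = (not x.islower(), x)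
--         i = 0
--         while i < len(out) and (not out[i].islower(), out[i]) < k:
--             i += 1
--         out.insert(i, x)
--     return out
-- ===== Notes on version B (the rewrite author's own statement) =====
-- stated objective: alternative
-- what changed: Replaces A's partition-into-two-lists plus two separate .sort() calls with a single insertion sort that places each distinct element directly at its final position using the composite key (not islower, string).
import Mathlib
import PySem

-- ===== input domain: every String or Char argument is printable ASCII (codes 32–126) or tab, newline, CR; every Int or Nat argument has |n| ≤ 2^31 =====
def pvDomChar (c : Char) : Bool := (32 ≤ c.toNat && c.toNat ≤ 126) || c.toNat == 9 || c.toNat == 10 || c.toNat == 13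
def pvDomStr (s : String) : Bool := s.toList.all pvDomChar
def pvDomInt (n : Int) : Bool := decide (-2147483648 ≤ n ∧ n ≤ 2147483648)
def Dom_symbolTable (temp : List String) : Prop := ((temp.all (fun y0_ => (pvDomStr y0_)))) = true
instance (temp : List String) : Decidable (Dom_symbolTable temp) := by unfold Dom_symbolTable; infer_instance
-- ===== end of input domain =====

-- B replaces A's partition-then-two-sorts by a single insertion sort on the composite
-- key (not islower, string): each distinct element is inserted at its final position
-- in one growing output list (objective: alternative; same return value).

-- s.islower() ported by hand: exact on the ASCII domain, where the cased characters are
-- exactly the alphabetic ones (true iff some alphabetic char and no uppercase char).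
def pyStrIslower (s : String) : Bool :=
  s.toList.any (fun c => PySem.Chars.isalpha c) && s.toList.all (fun c => !PySem.Chars.isupper c)

-- ===== PORT A =====
def symbolTable (temp : List String) : List String :=
  let cleanedTemp := PySem.Set.ofList temp
  let lu := cleanedTemp.foldl
    (fun (p : List String × List String) i =>
      if pyStrIslower i then (p.1 ++ [i], p.2) else (p.1, p.2 ++ [i])) ([], [])
  let lower := PySem.List.sorted lu.1 (fun x => x) false
  let upper := PySem.List.sorted lu.2 (fun x => x) false
  lower ++ upper

-- ===== PORT B =====
-- Python's tuple comparison (not x.islower(), x) < k, unfolded: False < True on bools,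
-- then code-point string comparison (Lean's < on String).
def keyRank (x : String) : Nat := if pyStrIslower x then 0 else 1

def keyLt (a b : String) : Bool :=
  decide (keyRank a < keyRank b) || (keyRank a == keyRank b && decide (a < b))

-- the inner while/insert of Source B: skip the elements whose key is < key x, put x there
def insOne (out : List String) (x : String) : List String :=
  match out with
  | [] => [x]
  | y :: ys => if keyLt y x then y :: insOne ys x else x :: y :: ys

def symbolTable_alt (temp : List String) : List String :=
  (PySem.Set.ofList temp).foldl insOne []

-- ===== PRECONDITION & SPEC =====
def Spec_symbolTable (temp : List String) (out : List String) : Prop := out = symbolTable_alt temp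
instance (temp : List String) (out : List String) : Decidable (Spec_symbolTable temp out) := by unfold Spec_symbolTable; infer_instance

-- ===== CLAIM (what is proved, stated in full; the proofs are below) =====
def Claim_equal_symbolTable : Prop := ∀ (temp : List String), Dom_symbolTable temp → Spec_symbolTable temp (symbolTable temp)

-- ===== LEMMAS AND PROOFS =====

-- `le a b` = "a may precede b" (the non-strict composite order used by the insertion sort)
def keyLe (a b : String) : Prop := keyLt b a = false

theorem keyLt_asymm {a b : String} (h : keyLt a b = true) : keyLt b a = false := by
  simp only [keyLt, Bool.or_eq_true, decide_eq_true_eq, Bool.and_eq_true, beq_iff_eq] at h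
  simp only [keyLt, Bool.or_eq_false_iff, decide_eq_false_iff_not, Bool.and_eq_false_iff,
    beq_eq_false_iff_ne, ne_eq]
  rcases h with h | ⟨he, hs⟩
  · constructor
    · omega
    · left; omega
  · constructor
    · omega
    · right
      simp only [not_lt]
      exact le_of_lt hs

theorem keyLe_antisymm {a b : String} (h1 : keyLe a b) (h2 : keyLe b a) : a = b := by
  simp only [keyLe, keyLt, Bool.or_eq_false_iff, decide_eq_false_iff_not,
    Bool.and_eq_false_iff, beq_eq_false_iff_ne, ne_eq, decide_eq_false_iff_not] at h1 h2
  rcases h1 with ⟨hr1, h1⟩; rcases h2 with ⟨hr2, h2⟩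
  have he : keyRank a = keyRank b := by omega
  rcases h1 with h1 | h1
  · exact absurd he.symm h1
  · rcases h2 with h2 | h2
    · exact absurd he h2
    · exact le_antisymm (not_lt.mp h1) (not_lt.mp h2)

theorem keyLe_trans {a b c : String} (h1 : keyLe a b) (h2 : keyLe b c) : keyLe a c := by
  simp only [keyLe, keyLt, Bool.or_eq_false_iff, decide_eq_false_iff_not,
    Bool.and_eq_false_iff, beq_eq_false_iff_ne, ne_eq, decide_eq_false_iff_not] at *
  rcases h1 with ⟨hr1, h1⟩; rcases h2 with ⟨hr2, h2⟩
  refine ⟨by omega, ?_⟩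
  by_cases he : keyRank c = keyRank a
  · right
    have heba : keyRank b = keyRank a := by omega
    have hecb : keyRank c = keyRank b := by omega
    rcases h1 with h1 | h1; · exact absurd heba h1
    rcases h2 with h2 | h2; · exact absurd hecb h2
    intro hca
    exact h2 (lt_of_lt_of_le hca (not_lt.mp h1))
  · left; exact he

-- insOne inserts x, permuting x :: out
theorem insOne_perm (out : List String) (x : String) : (insOne out x).Perm (x :: out) := by
  induction out with
  | nil => simp [insOne]
  | cons y ys ih =>
      simp only [insOne]
      split
      · exact (ih.cons y).trans (List.Perm.swap x y ys)
      · exact List.Perm.refl _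

theorem mem_insOne {z x : String} {out : List String} (h : z ∈ insOne out x) :
    z = x ∨ z ∈ out := by
  have := (insOne_perm out x).mem_iff.mp h
  simpa using this

-- insOne preserves sortedness w.r.t. keyLe
theorem insOne_pairwise {out : List String} (x : String) (h : out.Pairwise keyLe) :
    (insOne out x).Pairwise keyLe := by
  induction out with
  | nil => simp [insOne]
  | cons y ys ih =>
      rcases List.pairwise_cons.mp h with ⟨hy, hys⟩
      simp only [insOne]
      split
      · rename_i hlt
        refine List.pairwise_cons.mpr ⟨?_, ih hys⟩
        intro z hz
        rcases mem_insOne hz with rfl | hz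
        · exact keyLt_asymm hlt
        · exact hy z hz
      · rename_i hnlt
        refine List.pairwise_cons.mpr ⟨?_, h⟩
        intro z hz
        rcases List.mem_cons.mp hz with rfl | hz'
        · exact Bool.eq_false_iff.mpr (fun hc => hnlt hc)
        · exact keyLe_trans (Bool.eq_false_iff.mpr (fun hc => hnlt hc)) (hy z hz')

theorem foldl_insOne_perm (l acc : List String) : (l.foldl insOne acc).Perm (acc ++ l) := by
  induction l generalizing acc with
  | nil => simp
  | cons x t ih =>
      simp only [List.foldl_cons]
      refine (ih (insOne acc x)).trans ?_
      refine (List.Perm.append_right t ((insOne_perm acc x))).trans ?_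
      exact List.perm_middle.symm

theorem foldl_insOne_pairwise (l : List String) (acc : List String)
    (h : acc.Pairwise keyLe) : (l.foldl insOne acc).Pairwise keyLe := by
  induction l generalizing acc with
  | nil => simpa
  | cons x t ih => exact ih (insOne acc x) (insOne_pairwise x h)

-- A's partition loop is the pair of filters of its input.
theorem partition_foldl (l : List String) (p : List String × List String) :
    l.foldl (fun (p : List String × List String) i =>
      if pyStrIslower i then (p.1 ++ [i], p.2) else (p.1, p.2 ++ [i])) p
    = (p.1 ++ l.filter (fun x => pyStrIslower x),
       p.2 ++ l.filter (fun x => !pyStrIslower x)) := by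
  induction l generalizing p with
  | nil => simp
  | cons h t ih =>
      simp only [List.foldl_cons, List.filter_cons]
      by_cases hh : pyStrIslower h <;> simp [hh, ih]

-- sorting a filter of a duplicate-free list = filtering the sorted list.
theorem sorted_filter (xs : List String) (q : String → Bool) :
    PySem.List.sorted ((PySem.Set.ofList xs).filter q) (fun x => x) false
    = (PySem.List.sorted (PySem.Set.ofList xs) (fun x => x) false).filter q := by
  apply PySem.List.sorted_eq_of_perm_of_pairwise_lt
  · exact (PySem.List.sorted_perm (PySem.Set.ofList xs) (fun x => x) false).filter q
  · exact (PySem.List.sorted_ofList_pairwise_lt xs).filter q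

-- A's output is pairwise keyLe: strictly increasing strings inside each group,
-- and the lowercase group (rank 0) precedes the rest (rank 1).
theorem canonical_pairwise (S : List String) (hS : S.Pairwise (· < ·)) :
    ((S.filter (fun x => pyStrIslower x)) ++ (S.filter (fun x => !pyStrIslower x))).Pairwise keyLe := by
  rw [List.pairwise_append]
  refine ⟨?_, ?_, ?_⟩
  · have h := hS.filter (fun x => pyStrIslower x)
    refine h.imp_of_mem ?_
    intro a b ha hb hab
    have ha' := List.of_mem_filter ha
    have hb' := List.of_mem_filter hb
    exact keyLt_asymm (by simp [keyLt, keyRank, ha', hb', hab])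
  · have h := hS.filter (fun x => !pyStrIslower x)
    refine h.imp_of_mem ?_
    intro a b ha hb hab
    have ha' : pyStrIslower a = false := by simpa using List.of_mem_filter ha
    have hb' : pyStrIslower b = false := by simpa using List.of_mem_filter hb
    exact keyLt_asymm (by simp [keyLt, keyRank, ha', hb', hab])
  · intro a ha b hb
    have ha' := List.of_mem_filter ha
    have hb' : pyStrIslower b = false := by simpa using List.of_mem_filter hb
    exact keyLt_asymm (by simp [keyLt, keyRank, ha', hb'])

-- ===== VERDICT (by name: the statement is the Claim_ definition above) =====
theorem symbolTable_spec : Claim_equal_symbolTable := by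
  intro temp _
  show symbolTable temp = symbolTable_alt temp
  simp only [symbolTable, symbolTable_alt, partition_foldl, List.nil_append]
  rw [sorted_filter, sorted_filter]
  set S := PySem.List.sorted (PySem.Set.ofList temp) (fun x => x) false with hSdef
  have hS : S.Pairwise (· < ·) := PySem.List.sorted_ofList_pairwise_lt temp
  have hperm : ((S.filter (fun x => pyStrIslower x)) ++ (S.filter (fun x => !pyStrIslower x))).Perm
      ((PySem.Set.ofList temp).foldl insOne []) := by
    refine ((List.filter_append_perm _ S).trans ?_).trans (foldl_insOne_perm _ []).symm
    simpa using (PySem.List.sorted_perm (PySem.Set.ofList temp) (fun x => x) false)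
  exact hperm.eq_of_pairwise (le := keyLe)
    (fun a b _ _ h1 h2 => keyLe_antisymm h1 h2)
    (canonical_pairwise S hS) (foldl_insOne_pairwise _ _ (by simp))
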